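-- pv_equiv track=rewrite | github.com/harshsinghs1058/python_hackerrank_solutions | Validating_UID.py | uidCheck
-- ===== SOURCE A (Python) =====
-- def uidCheck(s):
--     upper = 0
--     digits = 0
--     if len(s) != 10:
--         return False
--     for i in range(len(s)):
--         for j in range(i + 1, len(s)):
--             if s[i] == s[j]:
--                 return False
--     for i in range(len(s)):
--         if not s[i].isalnum():
--             return False
--         if s[i].isdigit():
--             digits += 1
--
--         if s[i].isupper():
--             upper += 1
--     if upper < 2 or digits < 3:
--         return False
--     return True
-- ===== SOURCE B (Python) =====
-- def uidCheck(s):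
--     if len(s) != 10:
--         return False
--     if len(set(s)) != len(s):
--         return False
--     if not s.isalnum():
--         return False
--     return sum(c.isupper() for c in s) >= 2 and sum(c.isdigit() for c in s) >= 3
-- ===== Notes on version B (the rewrite author's own statement) =====
-- stated objective: simpler
-- what changed: The nested pairwise duplicate scan is replaced by a single set build compared by size, and the early-return counting loop by s.isalnum() plus two summed-boolean counts.
import Mathlib
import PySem

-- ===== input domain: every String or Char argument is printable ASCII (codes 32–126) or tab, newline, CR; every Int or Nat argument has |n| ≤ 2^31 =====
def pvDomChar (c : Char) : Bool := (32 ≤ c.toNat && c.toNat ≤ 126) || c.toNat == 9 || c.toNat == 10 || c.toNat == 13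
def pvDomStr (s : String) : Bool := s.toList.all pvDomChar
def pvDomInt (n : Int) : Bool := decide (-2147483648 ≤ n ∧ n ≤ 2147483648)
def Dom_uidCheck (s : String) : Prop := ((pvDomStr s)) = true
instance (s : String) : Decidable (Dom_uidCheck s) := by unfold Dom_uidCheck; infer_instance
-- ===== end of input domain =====

-- B replaces A's nested pairwise duplicate scan by a set built once and compared by size,
-- and A's early-return counting loop by s.isalnum() plus two summed-boolean counts (simpler).

-- ===== PORT A =====
-- the nested 'for i / for j in range(i+1,…)' early-return scan: each element compared with all later ones
def uidHasDup : List Char → Bool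
  | [] => false
  | c :: rest => rest.any (fun x => x == c) || uidHasDup rest

-- the counting loop with its early 'return False' on a non-alnum char, then the final threshold check
def uidCountLoop : List Char → Int → Int → Bool
  | [], upper, digits => !(decide (upper < 2) || decide (digits < 3))
  | c :: rest, upper, digits =>
    if !(PySem.Chars.isalnum c) then false
    else uidCountLoop rest (upper + (if PySem.Chars.isupper c then 1 else 0))
           (digits + (if PySem.Chars.isdigit c then 1 else 0))

def uidCheck (s : String) : Bool :=
  let cs := s.toList
  if cs.length ≠ 10 then false
  else if uidHasDup cs then false
  else uidCountLoop cs 0 0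

-- ===== PORT B =====
def uidCheck_alt (s : String) : Bool :=
  let cs := s.toList
  if cs.length ≠ 10 then false
  else if (PySem.Set.ofList cs).length ≠ cs.length then false
  else if !(PySem.Chars.strIsalnum cs) then false
  else decide (2 ≤ (cs.countP (fun c => PySem.Chars.isupper c) : Int)) &&
       decide (3 ≤ (cs.countP (fun c => PySem.Chars.isdigit c) : Int))

-- ===== PRECONDITION & SPEC =====
def Spec_uidCheck (s : String) (out : Bool) : Prop := out = uidCheck_alt s
instance (s : String) (out : Bool) : Decidable (Spec_uidCheck s out) := by unfold Spec_uidCheck; infer_instance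

-- ===== CLAIM (what is proved, stated in full; the proofs are below) =====
def Claim_equal_uidCheck : Prop := ∀ (s : String), Dom_uidCheck s → Spec_uidCheck s (uidCheck s)

-- ===== LEMMAS AND PROOFS =====

theorem uidHasDup_eq_not_nodup (cs : List Char) : uidHasDup cs = !decide cs.Nodup := by
  induction cs with
  | nil => simp [uidHasDup]
  | cons c rest ih =>
    simp [uidHasDup, ih, List.nodup_cons]
    by_cases h : c ∈ rest <;> simp [h]

theorem setLen_eq_iff_nodup (cs : List Char) :
    (PySem.Set.ofList cs).length = cs.length ↔ cs.Nodup := by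
  constructor
  · intro h
    have hperm : (PySem.Set.ofList cs).Perm cs.dedup := by
      rw [List.perm_ext_iff_of_nodup (PySem.Set.nodup_ofList cs) cs.nodup_dedup]
      intro a; simp [PySem.Set.mem_ofList, List.mem_dedup]
    have hlen : cs.dedup.length = cs.length := by
      rw [← hperm.length_eq]; exact h
    have : cs.dedup = cs := (List.dedup_sublist cs).eq_of_length hlen
    rw [← this]; exact cs.nodup_dedup
  · intro h; rw [PySem.Set.ofList_eq_self_of_nodup cs h]

theorem uidCountLoop_eq (cs : List Char) (u d : Int) :
    uidCountLoop cs u d =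
      (cs.all (fun c => PySem.Chars.isalnum c) &&
       (decide (2 ≤ u + (cs.countP (fun c => PySem.Chars.isupper c) : Int)) &&
        decide (3 ≤ d + (cs.countP (fun c => PySem.Chars.isdigit c) : Int)))) := by
  induction cs generalizing u d with
  | nil =>
    simp only [uidCountLoop, List.countP_nil, List.all_nil, Nat.cast_zero, add_zero,
      Bool.true_and]
    by_cases h1 : u < 2 <;> by_cases h2 : d < 3 <;>
      simp [h1, h2, show (2 ≤ u) ↔ ¬ (u < 2) by omega, show (3 ≤ d) ↔ ¬ (d < 3) by omega]
  | cons c rest ih =>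
    by_cases ha : PySem.Chars.isalnum c
    · simp only [uidCountLoop, ha, Bool.not_true, Bool.false_eq_true, if_false, ih,
        List.all_cons, Bool.true_and, List.countP_cons]
      push_cast
      congr 1
      congr 1
      · rw [decide_eq_decide]; split_ifs <;> omega
      · rw [decide_eq_decide]; split_ifs <;> omega
    · simp [uidCountLoop, ha]

-- ===== VERDICT (by name: the statement is the Claim_ definition above) =====
theorem uidCheck_spec : Claim_equal_uidCheck := by
  intro s _
  unfold Spec_uidCheck uidCheck uidCheck_alt
  set cs := s.toList with hcs
  by_cases hlen : cs.length = 10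
  · by_cases hdup : cs.Nodup
    · have h1 : uidHasDup cs = false := by simp [uidHasDup_eq_not_nodup, hdup]
      have h2 : (PySem.Set.ofList cs).length = cs.length := (setLen_eq_iff_nodup cs).mpr hdup
      have hne : ¬ cs.isEmpty := by
        simp only [List.isEmpty_iff]
        intro h; rw [h] at hlen; simp at hlen
      simp only [hlen, h1, h2, ne_eq, not_true_eq_false, if_false, Bool.false_eq_true,
        uidCountLoop_eq, PySem.Chars.strIsalnum, hne, Bool.not_false, Bool.true_and,
        zero_add]
      by_cases hall : cs.all (fun c => PySem.Chars.isalnum c) <;> simp [hall]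
    · have h1 : uidHasDup cs = true := by simp [uidHasDup_eq_not_nodup, hdup]
      have h2 : (PySem.Set.ofList cs).length ≠ 10 := by
        rw [← hlen, Ne, setLen_eq_iff_nodup]; exact hdup
      simp [hlen, h1, h2]
  · simp [hlen]
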